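-- pv_equiv track=rewrite | github.com/rseeley/advent-of-code-2023 | src/app/day_1_2.py | get_second_num
-- ===== SOURCE A (Python) =====
-- nums_as_strings = {
--     'one': 1,
--     'two': 2,
--     'three': 3,
--     'four': 4,
--     'five': 5,
--     'six': 6,
--     'seven': 7,
--     'eight': 8,
--     'nine': 9,
-- }
--
-- min_string_num_length = min(len(key) for key in nums_as_strings)
--
-- def get_second_num(row: str) -> str:
--     num_as_string = ''
--     string = ''
--
--     for char in reversed(row):
--         try:
--             int(char)
--             num_as_string = char
--             break
--         except ValueError:
--             string = f'{char}{string}'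
--
--             if len(string) >= min_string_num_length:
--                 for key in nums_as_strings:
--                     if string.startswith(key):
--                         num_as_string = str(nums_as_strings[key])
--                         break
--         if num_as_string:
--             break
--     return num_as_string
-- ===== SOURCE B (Python) =====
-- _vals = {
--     'one': '1', 'two': '2', 'three': '3', 'four': '4', 'five': '5',
--     'six': '6', 'seven': '7', 'eight': '8', 'nine': '9',
-- }
--
-- def get_second_num(row: str) -> str:
--     # Collect every match left-to-right (digit char, or a spelled word found by
--     # slicing row[i:i+L] and looking the slice up in a dict), then return the
--     # last one; no reversed scan, no growing suffix string, no try/except.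
--     matches = []
--     for i in range(len(row)):
--         c = row[i]
--         if c in '0123456789':
--             matches.append(c)
--         else:
--             for L in (3, 4, 5):
--                 w = _vals.get(row[i:i+L])
--                 if w is not None:
--                     matches.append(w)
--                     break
--     return matches[-1] if matches else ''
-- ===== Notes on version B (the rewrite author's own statement) =====
-- stated objective: faster
-- what changed: Instead of A's reversed scan that grows a suffix string, try/excepts int() on each char and breaks at the first hit, B scans forward once, collecting every match into a list (digit char, or a spelled word found by slicing row[i:i+L] and looking the slice up in a dict) and returns the last collected match.
import Mathlib
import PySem

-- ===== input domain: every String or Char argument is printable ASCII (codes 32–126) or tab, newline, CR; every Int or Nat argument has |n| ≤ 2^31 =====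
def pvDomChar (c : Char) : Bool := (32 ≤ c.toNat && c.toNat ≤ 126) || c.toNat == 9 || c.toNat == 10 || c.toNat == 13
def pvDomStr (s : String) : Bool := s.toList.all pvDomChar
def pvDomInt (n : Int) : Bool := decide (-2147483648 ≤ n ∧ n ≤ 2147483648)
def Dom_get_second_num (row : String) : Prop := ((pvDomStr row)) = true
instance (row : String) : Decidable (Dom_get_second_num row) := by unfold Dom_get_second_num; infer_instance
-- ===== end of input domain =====

-- B: instead of A's reversed scan with a growing suffix accumulator and early breaks,
-- collect every match left-to-right (digit char, or word found by slicing row[i:i+L]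
-- and looking the slice up in a dict) and return the last collected match.

-- ===== PORT A =====
def nums_as_strings : List (String × Int) :=
  [("one", 1), ("two", 2), ("three", 3), ("four", 4), ("five", 5),
   ("six", 6), ("seven", 7), ("eight", 8), ("nine", 9)]

def min_string_num_length : Nat :=
  ((nums_as_strings.map (fun kv => kv.1.toList.length)).min?).getD 0

-- inner 'for key in nums_as_strings: if string.startswith(key): … break'
def findWordA : List (String × Int) → List Char → Option String
  | [], _ => none
  | kv :: rest, s =>
    if PySem.Chars.startswith s kv.1.toList then some (PySem.Int.toStr kv.2)
    else findWordA rest s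

-- 'for char in reversed(row)', string accumulated as a List Char; an early break returns
def aLoop : List Char → List Char → String
  | [], _ => ""
  | c :: rest, string =>
    if (PySem.Int.ofChars? [c]).isSome then String.ofList [c]   -- int(char) succeeded; break
    else
      let string' := c :: string                            -- f'{char}{string}'
      match (if min_string_num_length ≤ string'.length then
               findWordA nums_as_strings string' else none) with
      | some v => v                                         -- num_as_string set; break
      | none => aLoop rest string'

def get_second_num (row : String) : String := aLoop row.toList.reverse []

-- ===== PORT B =====
def valsB : PySem.Dict String String :=
  PySem.Dict.ofList
    [("one", "1"), ("two", "2"), ("three", "3"), ("four", "4"), ("five", "5"),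
     ("six", "6"), ("seven", "7"), ("eight", "8"), ("nine", "9")]

def digitsB : List Char := "0123456789".toList

-- inner 'for L in (3, 4, 5): w = _vals.get(row[i:i+L]); if w is not None: …; break'
def wordLoopB : List Nat → List Char → Nat → Option String
  | [], _, _ => none
  | L :: rest, row, i =>
    match PySem.Dict.get? valsB
        (String.ofList (PySem.List.slice row (some (i : Int)) (some ((i : Int) + (L : Int))))) with
    | some w => some w
    | none => wordLoopB rest row i

-- 'for i in range(len(row))' appending each found match to `matches`
def collectB (row : List Char) (i : Nat) (ms : List String) : List String :=
  if h : i < row.length then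
    let c := row[i]
    collectB row (i + 1)
      (if PySem.Chars.isIn [c] digitsB then ms ++ [String.ofList [c]]
       else
         match wordLoopB [3, 4, 5] row i with
         | some w => ms ++ [w]
         | none => ms)
  else ms
termination_by row.length - i

-- 'return matches[-1] if matches else '''
def get_second_num_alt (row : String) : String :=
  match (collectB row.toList 0 []).getLast? with
  | some v => v
  | none => ""

-- ===== PRECONDITION & SPEC =====
def Spec_get_second_num (row : String) (out : String) : Prop := out = get_second_num_alt row
instance (row : String) (out : String) : Decidable (Spec_get_second_num row out) := by unfold Spec_get_second_num; infer_instance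

-- ===== CLAIM (what is proved, stated in full; the proofs are below) =====
def Claim_equal_get_second_num : Prop := ∀ (row : String), Dom_get_second_num row → Spec_get_second_num row (get_second_num row)

-- ===== LEMMAS AND PROOFS =====

def isDigitB (c : Char) : Bool := '0' ≤ c && c ≤ '9'

-- the match produced at one position: a digit char, or a spelled word starting there
def mAt : List Char → Option String
  | [] => none
  | c :: rest => if isDigitB c then some (String.ofList [c]) else findWordA nums_as_strings (c :: rest)

-- rightmost position with a match (later positions win)
def rmF : List Char → Option String
  | [] => none
  | c :: rest =>
    match rmF rest with
    | some v => some v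
    | none => mAt (c :: rest)

-- B's inner loop on the suffix starting at the scanned position
def wordTake : List Nat → List Char → Option String
  | [], _ => none
  | L :: rest, s =>
    match PySem.Dict.get? valsB (String.ofList (s.take L)) with
    | some w => some w
    | none => wordTake rest s

-- the full left-to-right list of matches
def allM : List Char → List String
  | [] => []
  | c :: rest =>
    (if isDigitB c then [String.ofList [c]] else (wordTake [3, 4, 5] (c :: rest)).toList) ++ allM rest

-- int(c) on one ASCII char succeeds exactly for '0'..'9'
set_option maxRecDepth 40000 in
theorem digit_enum : ∀ n : Nat, n < 128 →
    (PySem.Int.ofChars? [Char.ofNat n]).isSome = isDigitB (Char.ofNat n) := by decide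

theorem digit_eq (c : Char) (hc : c.toNat < 128) :
    (PySem.Int.ofChars? [c]).isSome = isDigitB c := by
  have h := digit_enum c.toNat hc
  rwa [Char.ofNat_toNat] at h

-- c in '0123456789' on one ASCII char is the digit range test
set_option maxRecDepth 40000 in
theorem isin_enum : ∀ n : Nat, n < 128 →
    PySem.Chars.isIn [Char.ofNat n] digitsB = isDigitB (Char.ofNat n) := by decide

theorem isin_eq (c : Char) (hc : c.toNat < 128) :
    PySem.Chars.isIn [c] digitsB = isDigitB c := by
  have h := isin_enum c.toNat hc
  rwa [Char.ofNat_toNat] at h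

theorem sw_false (s k : List Char) (h : s.length < k.length) :
    PySem.Chars.startswith s k = false := by
  by_contra hne
  have ht : PySem.Chars.startswith s k = true := by
    revert hne; cases PySem.Chars.startswith s k <;> simp
  have := ((PySem.Chars.startswith_iff s k).mp ht).length_le
  omega

theorem min_len_eq : min_string_num_length = 3 := by decide

theorem findWordA_short (s : List Char) (h : s.length < 3) :
    findWordA nums_as_strings s = none := by
  have h3 : ∀ k : List Char, 3 ≤ k.length → PySem.Chars.startswith s k = false :=
    fun k hk => sw_false s k (by omega)
  simp [nums_as_strings, findWordA,
    h3 ['o','n','e'] (by decide), h3 ['t','w','o'] (by decide), h3 ['t','h','r','e','e'] (by decide),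
    h3 ['f','o','u','r'] (by decide), h3 ['f','i','v','e'] (by decide), h3 ['s','i','x'] (by decide),
    h3 ['s','e','v','e','n'] (by decide), h3 ['e','i','g','h','t'] (by decide), h3 ['n','i','n','e'] (by decide)]

theorem take_of_sw (s k : List Char) (h : PySem.Chars.startswith s k = true) :
    s.take k.length = k :=
  (List.prefix_iff_eq_take.mp ((PySem.Chars.startswith_iff s k).mp h)).symm

theorem sw_of_take_eq (s t : List Char) (L : Nat) (h : s.take L = t) :
    PySem.Chars.startswith s t = true :=
  (PySem.Chars.startswith_iff s t).mpr (h ▸ List.take_prefix L s)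

theorem take_lower (s : List Char) (m n : Nat) (t : List Char) (hmn : m ≤ n)
    (h : s.take n = t) : s.take m = t.take m := by
  have hc := congrArg (List.take m) h
  rwa [List.take_take, Nat.min_eq_left hmn] at hc

-- unfolding equation for wordTake's cons case
theorem wordTake_cons (L : Nat) (rest : List Nat) (s : List Char) :
    wordTake (L :: rest) s =
      (match PySem.Dict.get? valsB (String.ofList (s.take L)) with
       | some w => some w
       | none => wordTake rest s) := rfl

theorem wt_some (L : Nat) (rest : List Nat) (s t : List Char) (w : String)
    (h : s.take L = t) (hg : PySem.Dict.get? valsB (String.ofList t) = some w) :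
    wordTake (L :: rest) s = some w := by
  rw [wordTake_cons, h, hg]

theorem wt_none (L : Nat) (rest : List Nat) (s t : List Char)
    (h : s.take L = t) (hg : PySem.Dict.get? valsB (String.ofList t) = none) :
    wordTake (L :: rest) s = wordTake rest s := by
  rw [wordTake_cons, h, hg]

theorem take_of_ofList_eq (s : List Char) (L : Nat) (k : String) (t : List Char)
    (hkt : k.toList = t) (h : String.ofList (s.take L) = k) :
    PySem.Chars.startswith s t = true := by
  apply sw_of_take_eq s t L
  have hq := congrArg String.toList h
  rw [hkt] at hq
  simpa using hq

-- the dict lookup chain over slice lengths 3,4,5 equals A's startswith scan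
theorem wordTake345_eq (s : List Char) :
    wordTake [3, 4, 5] s = findWordA nums_as_strings s := by
  by_cases h1 : PySem.Chars.startswith s ['o','n','e'] = true
  · have ht : s.take 3 = ['o','n','e'] := take_of_sw s _ h1
    rw [wt_some 3 _ s _ "1" ht rfl]
    simp [findWordA, nums_as_strings, h1]
    decide
  · by_cases h2 : PySem.Chars.startswith s ['t','w','o'] = true
    · have ht : s.take 3 = ['t','w','o'] := take_of_sw s _ h2
      rw [wt_some 3 _ s _ "2" ht rfl]
      simp [findWordA, nums_as_strings, h1, h2]
      decide
    · by_cases h3 : PySem.Chars.startswith s ['t','h','r','e','e'] = true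
      · have ht : s.take 5 = ['t','h','r','e','e'] := take_of_sw s _ h3
        have ht3 := take_lower s 3 5 _ (by omega) ht
        have ht4 := take_lower s 4 5 _ (by omega) ht
        rw [wt_none 3 _ s _ ht3 rfl, wt_none 4 _ s _ ht4 rfl, wt_some 5 _ s _ "3" ht rfl]
        simp [findWordA, nums_as_strings, h1, h2, h3]
        decide
      · by_cases h4 : PySem.Chars.startswith s ['f','o','u','r'] = true
        · have ht : s.take 4 = ['f','o','u','r'] := take_of_sw s _ h4
          have ht3 := take_lower s 3 4 _ (by omega) ht
          rw [wt_none 3 _ s _ ht3 rfl, wt_some 4 _ s _ "4" ht rfl]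
          simp [findWordA, nums_as_strings, h1, h2, h3, h4]
          decide
        · by_cases h5 : PySem.Chars.startswith s ['f','i','v','e'] = true
          · have ht : s.take 4 = ['f','i','v','e'] := take_of_sw s _ h5
            have ht3 := take_lower s 3 4 _ (by omega) ht
            rw [wt_none 3 _ s _ ht3 rfl, wt_some 4 _ s _ "5" ht rfl]
            simp [findWordA, nums_as_strings, h1, h2, h3, h4, h5]
            decide
          · by_cases h6 : PySem.Chars.startswith s ['s','i','x'] = true
            · have ht : s.take 3 = ['s','i','x'] := take_of_sw s _ h6
              rw [wt_some 3 _ s _ "6" ht rfl]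
              simp [findWordA, nums_as_strings, h1, h2, h3, h4, h5, h6]
              decide
            · by_cases h7 : PySem.Chars.startswith s ['s','e','v','e','n'] = true
              · have ht : s.take 5 = ['s','e','v','e','n'] := take_of_sw s _ h7
                have ht3 := take_lower s 3 5 _ (by omega) ht
                have ht4 := take_lower s 4 5 _ (by omega) ht
                rw [wt_none 3 _ s _ ht3 rfl, wt_none 4 _ s _ ht4 rfl, wt_some 5 _ s _ "7" ht rfl]
                simp [findWordA, nums_as_strings, h1, h2, h3, h4, h5, h6, h7]
                decide
              · by_cases h8 : PySem.Chars.startswith s ['e','i','g','h','t'] = true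
                · have ht : s.take 5 = ['e','i','g','h','t'] := take_of_sw s _ h8
                  have ht3 := take_lower s 3 5 _ (by omega) ht
                  have ht4 := take_lower s 4 5 _ (by omega) ht
                  rw [wt_none 3 _ s _ ht3 rfl, wt_none 4 _ s _ ht4 rfl, wt_some 5 _ s _ "8" ht rfl]
                  simp [findWordA, nums_as_strings, h1, h2, h3, h4, h5, h6, h7, h8]
                  decide
                · by_cases h9 : PySem.Chars.startswith s ['n','i','n','e'] = true
                  · have ht : s.take 4 = ['n','i','n','e'] := take_of_sw s _ h9
                    have ht3 := take_lower s 3 4 _ (by omega) ht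
                    rw [wt_none 3 _ s _ ht3 rfl, wt_some 4 _ s _ "9" ht rfl]
                    simp [findWordA, nums_as_strings, h1, h2, h3, h4, h5, h6, h7, h8, h9]
                    decide
                  · -- no word matches: every dict lookup must come up empty
                    have hnone : ∀ L : Nat,
                        PySem.Dict.get? valsB (String.ofList (s.take L)) = none := by
                      intro L
                      cases hh : PySem.Dict.get? valsB (String.ofList (s.take L)) with
                      | none => rfl
                      | some w =>
                        have hm := PySem.Dict.mem_items_of_get?_eq_some valsB hh
                        have hit : valsB.items =
                            [("one", "1"), ("two", "2"), ("three", "3"), ("four", "4"),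
                             ("five", "5"), ("six", "6"), ("seven", "7"), ("eight", "8"),
                             ("nine", "9")] := rfl
                        rw [hit] at hm
                        simp only [List.mem_cons, List.not_mem_nil, or_false,
                                   Prod.mk.injEq] at hm
                        rcases hm with ⟨h,_⟩|⟨h,_⟩|⟨h,_⟩|⟨h,_⟩|⟨h,_⟩|⟨h,_⟩|⟨h,_⟩|⟨h,_⟩|⟨h,_⟩
                        · exact absurd (take_of_ofList_eq s L "one" _ rfl h) h1
                        · exact absurd (take_of_ofList_eq s L "two" _ rfl h) h2
                        · exact absurd (take_of_ofList_eq s L "three" _ rfl h) h3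
                        · exact absurd (take_of_ofList_eq s L "four" _ rfl h) h4
                        · exact absurd (take_of_ofList_eq s L "five" _ rfl h) h5
                        · exact absurd (take_of_ofList_eq s L "six" _ rfl h) h6
                        · exact absurd (take_of_ofList_eq s L "seven" _ rfl h) h7
                        · exact absurd (take_of_ofList_eq s L "eight" _ rfl h) h8
                        · exact absurd (take_of_ofList_eq s L "nine" _ rfl h) h9
                    simp [wordTake, findWordA, nums_as_strings, hnone,
                          h1, h2, h3, h4, h5, h6, h7, h8, h9]

theorem wordLoopB_eq (lens : List Nat) (row : List Char) (i : Nat) :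
    wordLoopB lens row i = wordTake lens (row.drop i) := by
  induction lens with
  | nil => rfl
  | cons L rest ih =>
    simp [wordLoopB, wordTake, PySem.List.slice_natCast_add, ih]

theorem collectB_eq (row : List Char) (hdom : ∀ c ∈ row, c.toNat < 128) :
    ∀ n i ms, row.length - i = n → collectB row i ms = ms ++ allM (row.drop i) := by
  intro n
  induction n with
  | zero =>
    intro i ms h
    rw [collectB, dif_neg (by omega), List.drop_eq_nil_of_le (by omega), allM, List.append_nil]
  | succ n ih =>
    intro i ms h
    have hi : i < row.length := by omega
    have hdrop := List.drop_eq_getElem_cons hi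
    have hc : row[i].toNat < 128 := hdom _ (row.getElem_mem hi)
    rw [collectB, dif_pos hi, ih (i + 1) _ (by omega), hdrop, allM, ← hdrop,
        wordLoopB_eq, isin_eq _ hc]
    cases hd : isDigitB row[i] with
    | true => simp
    | false =>
      rw [hdrop]
      cases hw : wordTake [3, 4, 5] (row[i] :: row.drop (i + 1)) <;> simp

theorem getLast?_allM (s : List Char) : (allM s).getLast? = rmF s := by
  induction s with
  | nil => rfl
  | cons c rest ih =>
    rw [allM, List.getLast?_append, ih, rmF]
    cases hr : rmF rest with
    | some v => simp
    | none =>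
      cases hd : isDigitB c with
      | true => simp [mAt, hd]
      | false =>
        rw [mAt, hd, wordTake345_eq]
        cases hw : findWordA nums_as_strings (c :: rest) <;> simp

theorem rmF_append_some (xs ys : List Char) (v : String) (h : rmF ys = some v) :
    rmF (xs ++ ys) = some v := by
  induction xs with
  | nil => simpa using h
  | cons x xs ih => simp [rmF, ih]

theorem aLoop_eq (revpre : List Char) : ∀ suf : List Char,
    (∀ c ∈ revpre, c.toNat < 128) → rmF suf = none →
    aLoop revpre suf = (rmF (revpre.reverse ++ suf)).getD "" := by
  induction revpre with
  | nil => intro suf _ hsuf; simp [aLoop, hsuf]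
  | cons c rest ih =>
    intro suf hdom hsuf
    have hc : c.toNat < 128 := hdom c (by simp)
    have hd := digit_eq c hc
    have hlist : (c :: rest).reverse ++ suf = rest.reverse ++ (c :: suf) := by
      simp [List.reverse_cons, List.append_assoc]
    by_cases hdig : isDigitB c = true
    · have hm : rmF (c :: suf) = some (String.ofList [c]) := by
        simp [rmF, hsuf, mAt, hdig]
      rw [hlist, rmF_append_some _ _ _ hm]
      simp [aLoop, hd, hdig]
    · have hdigf : isDigitB c = false := by revert hdig; cases isDigitB c <;> simp
      have hguard : (if min_string_num_length ≤ (c :: suf).length then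
            findWordA nums_as_strings (c :: suf) else none) = findWordA nums_as_strings (c :: suf) := by
        rw [min_len_eq]
        by_cases hl : 3 ≤ (c :: suf).length
        · rw [if_pos hl]
        · rw [if_neg hl, (findWordA_short (c :: suf) (Nat.lt_of_not_le hl)).symm]
      cases hw : findWordA nums_as_strings (c :: suf) with
      | some v =>
        have hm : rmF (c :: suf) = some v := by simp [rmF, hsuf, mAt, hdigf, hw]
        rw [hlist, rmF_append_some _ _ _ hm]
        simp only [aLoop, hd, hdigf, Bool.false_eq_true, if_false]
        rw [hguard, hw]
        rfl
      | none =>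
        have hm : rmF (c :: suf) = none := by simp [rmF, hsuf, mAt, hdigf, hw]
        have hdom' : ∀ x ∈ rest, x.toNat < 128 := fun x hx => hdom x (by simp [hx])
        rw [hlist]
        simp only [aLoop, hd, hdigf, Bool.false_eq_true, if_false]
        rw [hguard, hw]
        exact ih (c :: suf) hdom' hm

-- ===== VERDICT (by name: the statement is the Claim_ definition above) =====
theorem get_second_num_spec : Claim_equal_get_second_num := by
  intro row hdom
  have hall : row.toList.all pvDomChar = true := hdom
  rw [List.all_eq_true] at hall
  have hdomL : ∀ c ∈ row.toList, c.toNat < 128 := by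
    intro c hc
    have hpc : pvDomChar c = true := hall c hc
    simp [pvDomChar] at hpc
    omega
  have hdomR : ∀ c ∈ row.toList.reverse, c.toNat < 128 := by
    intro c hc; exact hdomL c (by simpa using hc)
  show get_second_num row = get_second_num_alt row
  rw [get_second_num, get_second_num_alt,
      aLoop_eq row.toList.reverse [] hdomR rfl,
      collectB_eq row.toList hdomL row.toList.length 0 [] (by omega)]
  simp only [List.nil_append, List.drop_zero, List.reverse_reverse, List.append_nil]
  rw [getLast?_allM]
  cases h : rmF row.toList <;> simp
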